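-- pv_equiv track=rewrite | github.com/janmichael88/Leetcode_Monthly_Challenges | 2024_Challenges/Jun_2024.py | isNice
-- ===== SOURCE A (Python) =====
-- def isNice(s : str) -> bool:
--     chars = set(s)
--     for ch in chars:
--         if ch.islower() and ch.upper() not in chars:
--             return False
--         if ch.isupper() and ch.lower() not in chars:
--             return False
--
--     return True
-- ===== SOURCE B (Python) =====
-- def isNice(s: str) -> bool:
--     lowers = {c.upper() for c in s if c.islower()}
--     uppers = {c for c in s if c.isupper()}
--     return lowers == uppers
-- ===== Notes on version B (the rewrite author's own statement) =====
-- stated objective: simpler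
-- what changed: Replaces the early-return membership scan over one set of all characters by building two sets in a single pass over the string (uppercased forms of lowercase letters present, and uppercase letters present) and returning one set-equality comparison.
import Mathlib
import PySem

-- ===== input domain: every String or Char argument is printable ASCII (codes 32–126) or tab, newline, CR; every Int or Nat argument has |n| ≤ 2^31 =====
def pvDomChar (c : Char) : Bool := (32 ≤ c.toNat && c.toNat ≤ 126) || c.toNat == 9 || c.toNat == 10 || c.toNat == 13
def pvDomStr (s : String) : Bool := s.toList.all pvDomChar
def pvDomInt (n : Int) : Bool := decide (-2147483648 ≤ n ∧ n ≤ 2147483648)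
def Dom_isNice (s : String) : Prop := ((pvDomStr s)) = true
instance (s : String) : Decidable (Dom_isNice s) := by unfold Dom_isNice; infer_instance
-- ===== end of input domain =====

-- B replaces A's early-return membership scan over one set by building two sets
-- (uppercased lowercase letters present, uppercase letters present) and comparing them for set equality; objective: simpler.

-- ===== PORT A =====
-- chars = set(s); for ch in chars: early-return False on a failing check; return True.
-- The loop's result is order-independent (True iff no element fails), ported as .all over the set.
def isNice (s : String) : Bool :=
  let chars : PySem.Set Char := PySem.Set.ofList s.toList
  chars.all (fun ch =>
    !(PySem.Chars.islower ch && !(PySem.Set.contains chars (PySem.Chars.upperChar ch))) &&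
    !(PySem.Chars.isupper ch && !(PySem.Set.contains chars (PySem.Chars.lowerChar ch))))

-- ===== PORT B =====
def isNice_alt (s : String) : Bool :=
  let lowers : PySem.Set Char :=
    PySem.Set.ofList ((s.toList.filter (fun c => PySem.Chars.islower c)).map PySem.Chars.upperChar)
  let uppers : PySem.Set Char :=
    PySem.Set.ofList (s.toList.filter (fun c => PySem.Chars.isupper c))
  PySem.Set.equal lowers uppers

-- ===== PRECONDITION & SPEC =====
def Spec_isNice (s : String) (out : Bool) : Prop := out = isNice_alt s
instance (s : String) (out : Bool) : Decidable (Spec_isNice s out) := by unfold Spec_isNice; infer_instance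

-- ===== CLAIM (what is proved, stated in full; the proofs are below) =====
def Claim_equal_isNice : Prop := ∀ (s : String), Dom_isNice s → Spec_isNice s (isNice s)

-- ===== LEMMAS AND PROOFS =====

theorem pvLowRange (c : Char) (h1 : 'a' ≤ c) (h2 : c ≤ 'z') : c.toNat ∈ List.range' 97 26 := by
  rw [Char.le_def, UInt32.le_iff_toNat_le] at h1 h2
  have e1 : ('a' : Char).val.toNat = 97 := by decide
  have e2 : ('z' : Char).val.toNat = 122 := by decide
  have e3 : c.toNat = c.val.toNat := rfl
  simp [List.mem_range']
  exact ⟨c.toNat - 97, by omega, by omega⟩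

theorem pvUpRange (c : Char) (h1 : 'A' ≤ c) (h2 : c ≤ 'Z') : c.toNat ∈ List.range' 65 26 := by
  rw [Char.le_def, UInt32.le_iff_toNat_le] at h1 h2
  have e1 : ('A' : Char).val.toNat = 65 := by decide
  have e2 : ('Z' : Char).val.toNat = 90 := by decide
  have e3 : c.toNat = c.val.toNat := rfl
  simp [List.mem_range']
  exact ⟨c.toNat - 65, by omega, by omega⟩

theorem pvLowerFacts (c : Char) (h : PySem.Chars.islower c = true) :
    PySem.Chars.isupper (PySem.Chars.upperChar c) = true ∧
    PySem.Chars.lowerChar (PySem.Chars.upperChar c) = c := by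
  simp [PySem.Chars.islower] at h
  have hm : c.toNat ∈ List.range' 97 26 := pvLowRange c h.1 h.2
  have he : c = Char.ofNat c.toNat := (Char.ofNat_toNat c).symm
  rw [he]
  exact (by decide : ∀ n ∈ List.range' 97 26,
    PySem.Chars.isupper (PySem.Chars.upperChar (Char.ofNat n)) = true ∧
    PySem.Chars.lowerChar (PySem.Chars.upperChar (Char.ofNat n)) = Char.ofNat n) _ hm

theorem pvUpperFacts (c : Char) (h : PySem.Chars.isupper c = true) :
    PySem.Chars.islower (PySem.Chars.lowerChar c) = true ∧
    PySem.Chars.upperChar (PySem.Chars.lowerChar c) = c := by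
  simp [PySem.Chars.isupper] at h
  have hm : c.toNat ∈ List.range' 65 26 := pvUpRange c h.1 h.2
  have he : c = Char.ofNat c.toNat := (Char.ofNat_toNat c).symm
  rw [he]
  exact (by decide : ∀ n ∈ List.range' 65 26,
    PySem.Chars.islower (PySem.Chars.lowerChar (Char.ofNat n)) = true ∧
    PySem.Chars.upperChar (PySem.Chars.lowerChar (Char.ofNat n)) = Char.ofNat n) _ hm

theorem pvA_iff (s : String) : isNice s = true ↔
    ∀ ch ∈ s.toList,
      (PySem.Chars.islower ch = true → PySem.Chars.upperChar ch ∈ s.toList) ∧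
      (PySem.Chars.isupper ch = true → PySem.Chars.lowerChar ch ∈ s.toList) := by
  simp [isNice, List.all_eq_true, PySem.Set.mem_ofList, or_iff_not_imp_left, Bool.not_eq_false]

theorem pvB_iff (s : String) : isNice_alt s = true ↔
    ∀ x : Char,
      (∃ c ∈ s.toList, PySem.Chars.islower c = true ∧ PySem.Chars.upperChar c = x) ↔
      (x ∈ s.toList ∧ PySem.Chars.isupper x = true) := by
  simp [isNice_alt, PySem.Set.equal_iff, PySem.Set.mem_ofList, List.mem_map, List.mem_filter, and_assoc]

-- ===== VERDICT (by name: the statement is the Claim_ definition above) =====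
theorem isNice_spec : Claim_equal_isNice := by
  intro s _
  unfold Spec_isNice
  rw [Bool.eq_iff_iff, pvA_iff, pvB_iff]
  constructor
  · intro hA x
    constructor
    · rintro ⟨c, hc, hlow, rfl⟩
      exact ⟨(hA c hc).1 hlow, (pvLowerFacts c hlow).1⟩
    · rintro ⟨hx, hup⟩
      exact ⟨PySem.Chars.lowerChar x, (hA x hx).2 hup,
        (pvUpperFacts x hup).1, (pvUpperFacts x hup).2⟩
  · intro hB ch hch
    constructor
    · intro hlow
      exact ((hB (PySem.Chars.upperChar ch)).1 ⟨ch, hch, hlow, rfl⟩).1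
    · intro hup
      obtain ⟨c, hc, hlowc, hupc⟩ := (hB ch).2 ⟨hch, hup⟩
      have : PySem.Chars.lowerChar ch = c := by
        rw [← hupc]; exact (pvLowerFacts c hlowc).2
      rw [this]; exact hc
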